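-- pv_equiv track=rewrite | github.com/donghyun-98/Code-Kata-SQL-Python- | 프로그래머스/1/155652. 둘만의 암호/둘만의 암호.py | solution
-- ===== SOURCE A (Python) =====
-- def solution(s, skip, index):
--     answer = ''
--
--     for char in s:  # s의 각 문자에 대해
--         cnt = 0
--         while cnt < index:  # index 보다 작을 때
--             char = chr(ord(char) + 1)  # 문자를 다음 문자로 바꾸고
--             if ord(char) > 122:  # 만약 바꿨을 때 z의 아스키코드를 넘어버린다면
--                 char = 'a'  # a로 바꾸기.
--             if char not in skip:  # skip 리스트에 없으면 횟수 늘리고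
--                 cnt += 1
--
--         answer += char  # while 문을 다 돌았다면 변환 완료된 문자열을 answer에 추가.
--
--     return answer
-- ===== SOURCE B (Python) =====
-- def solution(s, skip, index):
--     skipset = set(skip)
--     allowed = [c for c in range(97, 123) if chr(c) not in skipset]
--     m = len(allowed)
--     out = []
--     for ch in s:
--         if index <= 0:
--             out.append(ch)
--             continue
--         o = ord(ch)
--         prefix = [c for c in range(o + 1, 123) if chr(c) not in skipset]
--         if index <= len(prefix):
--             out.append(chr(prefix[index - 1]))
--         else:
--             r = index - len(prefix)
--             out.append(chr(allowed[(r - 1) % m]))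
--     return ''.join(out)
-- ===== Notes on version B (the rewrite author's own statement) =====
-- stated objective: faster
-- what changed: Replaces the per-character while-loop that steps one code point at a time (index iterations per character) by direct indexing into a precomputed non-skip alphabet: the remaining steps after the prefix run up to 'z' are resolved with modular arithmetic, so no per-step iteration remains.
import Mathlib
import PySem

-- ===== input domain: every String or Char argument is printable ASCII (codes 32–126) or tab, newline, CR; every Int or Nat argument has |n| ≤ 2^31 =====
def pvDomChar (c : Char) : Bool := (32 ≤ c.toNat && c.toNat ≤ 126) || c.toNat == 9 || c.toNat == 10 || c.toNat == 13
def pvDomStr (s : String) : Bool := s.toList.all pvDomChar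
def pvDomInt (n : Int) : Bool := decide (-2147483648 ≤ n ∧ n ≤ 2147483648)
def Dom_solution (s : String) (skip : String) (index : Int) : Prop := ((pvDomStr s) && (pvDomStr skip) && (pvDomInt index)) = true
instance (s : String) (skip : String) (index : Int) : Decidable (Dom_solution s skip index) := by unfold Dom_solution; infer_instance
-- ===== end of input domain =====

-- B replaces A's per-character one-step-at-a-time while loop by direct indexing into the
-- precomputed non-skip alphabet with modular arithmetic (objective: faster, asymptotically).

-- ===== PORT A =====
-- char = chr(ord(char)+1); if ord(char) > 122: char = 'a'
def nextCharA (c : Char) : Char :=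
  let c' := Char.ofNat (c.toNat + 1)
  if c'.toNat > 122 then 'a' else c'

-- the inner 'while cnt < index' loop; fuel only makes the (possibly non-terminating)
-- Python loop total — inside Pre_solution the fuel provably suffices
def loopA (skip : String) (index : Int) : Nat → Char → Int → Char
  | 0, c, _ => c
  | f + 1, c, cnt =>
    if cnt < index then
      let c' := nextCharA c
      if skip.toList.contains c' then loopA skip index f c' cnt
      else loopA skip index f c' (cnt + 1)
    else c

def solution (s : String) (skip : String) (index : Int) : String :=
  String.mk (s.toList.foldl (fun acc ch => acc ++ [loopA skip index (149 * index.toNat + 150) ch 0]) [])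

-- ===== PORT B =====
-- chr(u) not in skipset
def nsOk (skip : String) (u : Nat) : Bool := ! (skip.toList.contains (Char.ofNat u))

-- [c for c in range(97,123) if chr(c) not in skipset]   (codes are nonnegative, so Nat is exact)
def allowedB (skip : String) : List Nat := (List.range' 97 26).filter (nsOk skip)

-- [c for c in range(o+1,123) if chr(c) not in skipset]
def prefixB (skip : String) (o : Nat) : List Nat := (List.range' (o + 1) (123 - (o + 1))).filter (nsOk skip)

def altChar (skip : String) (index : Int) (ch : Char) : Char :=
  if index ≤ 0 then ch
  else
    let pre := prefixB skip ch.toNat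
    if index ≤ (pre.length : Int) then Char.ofNat (pre.getD (index - 1).toNat 0)
    else
      let r := index - (pre.length : Int)
      Char.ofNat ((allowedB skip).getD ((r - 1).toNat % (allowedB skip).length) 0)

def solution_alt (s : String) (skip : String) (index : Int) : String :=
  String.mk (s.toList.foldl (fun acc ch => acc ++ [altChar skip index ch]) [])

-- ===== PRECONDITION & SPEC =====
-- Pre_ excludes exactly the inputs on which A's while loop never terminates: index > 0 while
-- every lowercase letter is in skip and some character of s has fewer than index non-skip
-- codes strictly between it and 'z'.  A returns on every input satisfying Pre_.
def Pre_solution (s : String) (skip : String) (index : Int) : Prop :=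
  index ≤ 0 ∨ 0 < (allowedB skip).length ∨
    ∀ c ∈ s.toList, index ≤ ((prefixB skip c.toNat).length : Int)
instance (s : String) (skip : String) (index : Int) : Decidable (Pre_solution s skip index) := by
  unfold Pre_solution; infer_instance

def pvWitness_solution : String × String × Int := ("hello world", "xz", 7)

def Spec_solution (s : String) (skip : String) (index : Int) (out : String) : Prop := out = solution_alt s skip index
instance (s : String) (skip : String) (index : Int) (out : String) : Decidable (Spec_solution s skip index out) := by unfold Spec_solution; infer_instance

-- ===== CLAIM (what is proved, stated in full; the proofs are below) =====
def Claim_equal_solution : Prop := ∀ (s : String) (skip : String) (index : Int), Dom_solution s skip index → Pre_solution s skip index → Spec_solution s skip index (solution s skip index)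

-- ===== LEMMAS AND PROOFS =====

-- proof-side closed form: result of the walk that still has to count k non-skip positions from c
def BkChar (skip : String) (c : Char) (k : Nat) : Char :=
  if k = 0 then c
  else if k ≤ (prefixB skip c.toNat).length then Char.ofNat ((prefixB skip c.toNat).getD (k - 1) 0)
  else Char.ofNat ((allowedB skip).getD ((k - (prefixB skip c.toNat).length - 1) % (allowedB skip).length) 0)

lemma foldl_app {α β : Type} (f : α → β) : ∀ (l : List α) (acc : List β),
    l.foldl (fun acc ch => acc ++ [f ch]) acc = acc ++ l.map f := by
  intro l
  induction l with
  | nil => intro acc; simp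
  | cons x xs ih => intro acc; simp [List.foldl, ih]

lemma prefixB_of_ge (skip : String) (u : Nat) (h : 122 ≤ u) : prefixB skip u = [] := by
  unfold prefixB
  have : 123 - (u + 1) = 0 := by omega
  simp [this]

lemma prefixB_cons (skip : String) (u : Nat) (h : u < 122) :
    prefixB skip u = (if nsOk skip (u + 1) then [u + 1] else []) ++ prefixB skip (u + 1) := by
  unfold prefixB
  have h1 : 123 - (u + 1) = (123 - (u + 2)) + 1 := by omega
  rw [h1, List.range'_succ, List.filter_cons]
  by_cases hns : nsOk skip (u + 1) <;> simp [hns]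

lemma allowedB_eq (skip : String) :
    allowedB skip = (if nsOk skip 97 then [97] else []) ++ prefixB skip 97 := by
  unfold allowedB prefixB
  have : (26 : Nat) = 25 + 1 := by omega
  rw [this, List.range'_succ, List.filter_cons]
  norm_num
  by_cases hns : nsOk skip 97 <;> simp [hns]

lemma char_toNat_ofNat_le (n : Nat) (h : n ≤ 127) : (Char.ofNat n).toNat = n := by
  have hv : n.isValidChar := Or.inl (by omega)
  simp [Char.ofNat, hv]

lemma nextCharA_lt (c : Char) (h : c.toNat < 122) :
    nextCharA c = Char.ofNat (c.toNat + 1) ∧ (nextCharA c).toNat = c.toNat + 1 := by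
  have ht : (Char.ofNat (c.toNat + 1)).toNat = c.toNat + 1 := char_toNat_ofNat_le _ (by omega)
  unfold nextCharA
  simp only [ht]
  rw [if_neg (by omega)]
  exact ⟨rfl, ht⟩

lemma nextCharA_ge (c : Char) (h1 : 122 ≤ c.toNat) (h2 : c.toNat ≤ 126) :
    nextCharA c = 'a' := by
  have ht : (Char.ofNat (c.toNat + 1)).toNat = c.toNat + 1 := char_toNat_ofNat_le _ (by omega)
  unfold nextCharA
  simp only [ht]
  rw [if_pos (by omega)]

lemma mem_prefixB {skip : String} {u p : Nat} (h : p ∈ prefixB skip u) :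
    u + 1 ≤ p ∧ p ≤ 122 := by
  unfold prefixB at h
  have := (List.mem_filter.mp h).1
  rw [List.mem_range'_1] at this
  omega

lemma mem_allowedB {skip : String} {a : Nat} (h : a ∈ allowedB skip) :
    97 ≤ a ∧ a ≤ 122 := by
  unfold allowedB at h
  have := (List.mem_filter.mp h).1
  rw [List.mem_range'_1] at this
  omega

lemma prefixB_cons_t (skip : String) (u : Nat) (h : u < 122) (hns : nsOk skip (u + 1) = true) :
    prefixB skip u = (u + 1) :: prefixB skip (u + 1) := by
  rw [prefixB_cons skip u h, hns]; simp

lemma prefixB_cons_f (skip : String) (u : Nat) (h : u < 122) (hns : nsOk skip (u + 1) = false) :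
    prefixB skip u = prefixB skip (u + 1) := by
  rw [prefixB_cons skip u h, hns]; simp

lemma allowedB_eq_t (skip : String) (hns : nsOk skip 97 = true) :
    allowedB skip = 97 :: prefixB skip 97 := by
  rw [allowedB_eq skip, hns]; simp

lemma allowedB_eq_f (skip : String) (hns : nsOk skip 97 = false) :
    allowedB skip = prefixB skip 97 := by
  rw [allowedB_eq skip, hns]; simp

lemma contains_nextCharA (skip : String) (c : Char) :
    skip.toList.contains (nextCharA c) = ! nsOk skip (nextCharA c).toNat := by
  simp [nsOk, Char.ofNat_toNat]

-- number of raw steps of A's loop until the next counted position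
def jDist (skip : String) (c : Char) : Nat :=
  if prefixB skip c.toNat = [] then
    (if c.toNat ≤ 122 then 123 - c.toNat else 1) + ((allowedB skip).headD 97 - 97)
  else (prefixB skip c.toNat).headD 0 - c.toNat

lemma jDist_le (skip : String) (c : Char) : jDist skip c ≤ 148 := by
  unfold jDist
  cases hp : prefixB skip c.toNat with
  | cons p l =>
    have := mem_prefixB (skip := skip) (u := c.toNat) (p := p) (by rw [hp]; simp)
    rw [if_neg (List.cons_ne_nil p l)]
    simp only [List.headD_cons]
    omega
  | nil =>
    rw [if_pos rfl]
    cases ha : allowedB skip with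
    | nil => simp only [List.headD_nil]; split <;> omega
    | cons a l =>
      have := mem_allowedB (skip := skip) (a := a) (by rw [ha]; simp)
      simp only [List.headD_cons]
      split <;> omega

lemma step_eq (skip : String) (c : Char) (k : Nat)
    (hc : c.toNat ≤ 126) (hk : 1 ≤ k)
    (hm : 0 < (allowedB skip).length ∨ k ≤ (prefixB skip c.toNat).length) :
    BkChar skip c k
      = BkChar skip (nextCharA c) (if skip.toList.contains (nextCharA c) then k else k - 1)
    ∧ (0 < (allowedB skip).length ∨
        (if skip.toList.contains (nextCharA c) then k else k - 1)
          ≤ (prefixB skip (nextCharA c).toNat).length) := by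
  have hk0 : ¬ (k = 0) := by omega
  rw [contains_nextCharA]
  by_cases hu : c.toNat < 122
  · obtain ⟨hne, hnt⟩ := nextCharA_lt c hu
    rw [hnt]
    by_cases hns : nsOk skip (c.toNat + 1)
    · -- counted step: k' = k - 1
      have hpc := prefixB_cons_t skip c.toNat hu hns
      simp only [hns, Bool.not_true, Bool.false_eq_true, if_false]
      constructor
      · unfold BkChar
        rw [hnt, hpc]
        simp only [List.length_cons, if_neg hk0]
        rcases Nat.lt_or_ge k 2 with h2 | h2
        · have hr1 : k - 1 = 0 := by omega
          rw [if_pos (by omega), if_pos hr1]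
          simp only [hr1, List.getD_cons_zero]
          rw [hne]
        · have hr0 : ¬ (k - 1 = 0) := by omega
          by_cases h3 : k ≤ (prefixB skip (c.toNat + 1)).length + 1
          · rw [if_pos h3, if_neg hr0, if_pos (by omega)]
            conv_lhs => rw [show k - 1 = (k - 2) + 1 from by omega]
            simp only [List.getD_cons_succ]
            rw [show k - 1 - 1 = k - 2 from by omega]
          · rw [if_neg h3, if_neg hr0, if_neg (by omega)]
            rw [show k - ((prefixB skip (c.toNat + 1)).length + 1) - 1
                  = k - 1 - (prefixB skip (c.toNat + 1)).length - 1 from by omega]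
      · rcases hm with hm | hm
        · exact Or.inl hm
        · right; rw [hpc] at hm; simp only [List.length_cons] at hm; omega
    · -- skip step: k' = k
      have hns' : nsOk skip (c.toNat + 1) = false := by simp [hns]
      have hpc := prefixB_cons_f skip c.toNat hu hns'
      simp only [hns', Bool.not_false, if_true]
      constructor
      · unfold BkChar
        rw [hnt, hpc]
        simp only [if_neg hk0]
      · rw [hpc] at hm; exact hm
  · -- wrap: c' = 'a'
    have hne : nextCharA c = 'a' := nextCharA_ge c (by omega) hc
    have hnt : (nextCharA c).toNat = 97 := by rw [hne]; rfl
    have hpc : prefixB skip c.toNat = [] := prefixB_of_ge skip c.toNat (by omega)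
    have hm' : 0 < (allowedB skip).length := by
      rcases hm with hm | hm
      · exact hm
      · rw [hpc] at hm; simp only [List.length_nil] at hm; omega
    rw [hnt]
    by_cases hns : nsOk skip 97
    · -- 'a' is counted: k' = k - 1
      have hal := allowedB_eq_t skip hns
      simp only [hns, Bool.not_true, Bool.false_eq_true, if_false]
      refine ⟨?_, Or.inl hm'⟩
      unfold BkChar
      rw [hnt, hpc, hal]
      simp only [List.length_nil, List.length_cons, Nat.sub_zero, if_neg hk0,
        if_neg (show ¬ (k ≤ 0) from by omega)]
      rcases Nat.lt_or_ge k 2 with h2 | h2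
      · have hr1 : k - 1 = 0 := by omega
        rw [if_pos hr1]
        simp only [hr1, Nat.zero_mod, List.getD_cons_zero]
        rw [hne]
      · have hr0 : ¬ (k - 1 = 0) := by omega
        rw [if_neg hr0]
        by_cases h3 : k - 1 ≤ (prefixB skip 97).length
        · rw [if_pos h3, Nat.mod_eq_of_lt (show k - 1 < (prefixB skip 97).length + 1 from by omega)]
          conv_lhs => rw [show k - 1 = (k - 2) + 1 from by omega]
          simp only [List.getD_cons_succ]
          rw [show k - 1 - 1 = k - 2 from by omega]
        · rw [if_neg h3]
          conv_lhs => rw [show k - 1 = (k - 1 - ((prefixB skip 97).length + 1))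
              + ((prefixB skip 97).length + 1) from by omega]
          rw [Nat.add_mod_right]
          rw [show k - 1 - ((prefixB skip 97).length + 1)
                = k - 1 - (prefixB skip 97).length - 1 from by omega]
    · -- 'a' is skipped: k' = k
      have hns' : nsOk skip 97 = false := by simp [hns]
      have hal := allowedB_eq_f skip hns'
      simp only [hns', Bool.not_false, if_true]
      refine ⟨?_, Or.inl hm'⟩
      unfold BkChar
      rw [hnt, hpc, hal]
      rw [hal] at hm'
      simp only [List.length_nil, Nat.sub_zero, if_neg hk0,
        if_neg (show ¬ (k ≤ 0) from by omega)]
      by_cases h3 : k ≤ (prefixB skip 97).length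
      · rw [if_pos h3, Nat.mod_eq_of_lt (show k - 1 < (prefixB skip 97).length from by omega)]
      · rw [if_neg h3]
        conv_lhs => rw [show k - 1 = (k - 1 - (prefixB skip 97).length)
            + (prefixB skip 97).length from by omega]
        rw [Nat.add_mod_right]
        rw [show k - 1 - (prefixB skip 97).length = k - (prefixB skip 97).length - 1 from by omega]

lemma jDist_skip (skip : String) (c : Char) (hc : c.toNat ≤ 126)
    (hcont : skip.toList.contains (nextCharA c) = true)
    (hmj : 0 < (allowedB skip).length ∨ prefixB skip c.toNat ≠ []) :
    jDist skip c = jDist skip (nextCharA c) + 1 := by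
  have hns : nsOk skip (nextCharA c).toNat = false := by
    have := contains_nextCharA skip c
    rw [hcont] at this
    cases h : nsOk skip (nextCharA c).toNat
    · rfl
    · rw [h] at this; simp at this
  by_cases hu : c.toNat < 122
  · obtain ⟨hne, hnt⟩ := nextCharA_lt c hu
    rw [hnt] at hns
    have hpc := prefixB_cons_f skip c.toNat hu hns
    unfold jDist
    rw [hnt, hpc]
    cases hp : prefixB skip (c.toNat + 1) with
    | cons p l =>
      have hmem := mem_prefixB (skip := skip) (u := c.toNat + 1) (p := p) (by rw [hp]; simp)
      rw [if_neg (List.cons_ne_nil p l), if_neg (List.cons_ne_nil p l)]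
      simp only [List.headD_cons]
      omega
    | nil =>
      rw [if_pos rfl, if_pos rfl]
      split_ifs <;> omega
  · have hne : nextCharA c = 'a' := nextCharA_ge c (by omega) hc
    have hnt : (nextCharA c).toNat = 97 := by rw [hne]; rfl
    rw [hnt] at hns
    have hpc : prefixB skip c.toNat = [] := prefixB_of_ge skip c.toNat (by omega)
    have hm' : 0 < (allowedB skip).length := by
      rcases hmj with h | h
      · exact h
      · exact absurd hpc h
    have hal := allowedB_eq_f skip hns
    unfold jDist
    rw [hnt, hpc, hal]
    cases hp : prefixB skip 97 with
    | nil => rw [hal, hp] at hm'; simp at hm'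
    | cons p l =>
      have hmem := mem_prefixB (skip := skip) (u := 97) (p := p) (by rw [hp]; simp)
      rw [if_pos rfl, if_neg (List.cons_ne_nil p l)]
      simp only [List.headD_cons]
      split_ifs <;> omega

lemma nextCharA_le (c : Char) (hc : c.toNat ≤ 126) : (nextCharA c).toNat ≤ 126 := by
  by_cases hu : c.toNat < 122
  · have := (nextCharA_lt c hu).2; omega
  · rw [nextCharA_ge c (by omega) hc]; decide

lemma key_loop (skip : String) (index : Int) : ∀ (f : Nat) (c : Char) (cnt : Int),
    c.toNat ≤ 126 →
    (0 < (allowedB skip).length ∨ (index - cnt).toNat ≤ (prefixB skip c.toNat).length) →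
    149 * (index - cnt).toNat + jDist skip c + 1 ≤ f →
    loopA skip index f c cnt = BkChar skip c (index - cnt).toNat := by
  intro f
  induction f with
  | zero => intro c cnt _ _ hf; omega
  | succ f ih =>
    intro c cnt hc hm hf
    by_cases hlt : cnt < index
    · have hk1 : 1 ≤ (index - cnt).toNat := by omega
      obtain ⟨hstep, hm'⟩ := step_eq skip c (index - cnt).toNat hc hk1 hm
      have hc' : (nextCharA c).toNat ≤ 126 := nextCharA_le c hc
      by_cases hcont : skip.toList.contains (nextCharA c) = true
      · -- skip step
        have hjl : jDist skip c = jDist skip (nextCharA c) + 1 := by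
          apply jDist_skip skip c hc hcont
          rcases hm with h | h
          · exact Or.inl h
          · right; intro hnil; rw [hnil] at h; simp at h; omega
        rw [hcont, if_pos rfl] at hstep hm'
        have hmem : nextCharA c ∈ skip.toList := by simpa using hcont
        have : loopA skip index (f + 1) c cnt = loopA skip index f (nextCharA c) cnt := by
          simp [loopA, hlt, hmem]
        rw [this, ih (nextCharA c) cnt hc' hm' (by omega), hstep]
      · -- counted step
        have hcf : skip.toList.contains (nextCharA c) = false := by
          cases h : skip.toList.contains (nextCharA c)
          · rfl
          · exact absurd h hcont
        rw [hcf] at hstep hm'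
        simp only [Bool.false_eq_true, if_false] at hstep hm'
        have hnmem : nextCharA c ∉ skip.toList := by simpa using hcf
        have : loopA skip index (f + 1) c cnt = loopA skip index f (nextCharA c) (cnt + 1) := by
          simp [loopA, hlt, hnmem]
        rw [this]
        have hkk : (index - (cnt + 1)).toNat = (index - cnt).toNat - 1 := by omega
        have hjl' := jDist_le skip (nextCharA c)
        rw [ih (nextCharA c) (cnt + 1) hc' (by rw [hkk]; exact hm') (by rw [hkk]; omega), hkk, hstep]
    · have hz : (index - cnt).toNat = 0 := by omega
      have : loopA skip index (f + 1) c cnt = c := by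
        simp [loopA, hlt]
      rw [this, hz]
      unfold BkChar
      rw [if_pos rfl]

lemma altChar_eq_BkChar (skip : String) (index : Int) (ch : Char) :
    altChar skip index ch = BkChar skip ch index.toNat := by
  unfold altChar BkChar
  by_cases h0 : index ≤ 0
  · have : index.toNat = 0 := by omega
    simp [h0, this]
  · have hk0 : ¬ index.toNat = 0 := by omega
    have h1 : (index ≤ ((prefixB skip ch.toNat).length : Int)) ↔
        index.toNat ≤ (prefixB skip ch.toNat).length := by omega
    simp only [h0, if_false, hk0, if_false]
    by_cases h2 : index.toNat ≤ (prefixB skip ch.toNat).length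
    · have : index ≤ ((prefixB skip ch.toNat).length : Int) := by omega
      have he : (index - 1).toNat = index.toNat - 1 := by omega
      simp [this, h2, he]
    · have : ¬ index ≤ ((prefixB skip ch.toNat).length : Int) := by omega
      have he : (index - ((prefixB skip ch.toNat).length : Int) - 1).toNat
          = index.toNat - (prefixB skip ch.toNat).length - 1 := by omega
      simp [this, h2, he]

-- ===== VERDICT (by name: the statement is the Claim_ definition above) =====
theorem solution_spec : Claim_equal_solution := by
  intro s skip index hdom hpre
  unfold Spec_solution solution solution_alt
  rw [foldl_app, foldl_app]
  congr 1
  apply List.map_congr_left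
  intro ch hch
  have hc : ch.toNat ≤ 126 := by
    have hd : pvDomStr s = true := by
      unfold Dom_solution at hdom; simp at hdom; tauto
    have := (List.all_eq_true.mp hd) ch hch
    unfold pvDomChar at this
    simp at this
    omega
  have hm : 0 < (allowedB skip).length ∨ (index - 0).toNat ≤ (prefixB skip ch.toNat).length := by
    rcases hpre with h | h | h
    · right; omega
    · left; exact h
    · right; have := h ch hch; omega
  have hjl := jDist_le skip ch
  rw [key_loop skip index _ ch 0 hc hm (by omega)]
  rw [altChar_eq_BkChar]
  congr 1
  omega
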